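-- pv_equiv track=rewrite | github.com/jiahjiah/Grade-12-CS | Mocking Sonebob Reddit Bot/main.py | spongbobMockCovert
-- ===== SOURCE A (Python) =====
-- def spongbobMockCovert(toBeConverted):
--     converted = ""
--
--     while toBeConverted.find("e") >= 0:
--         toBeConverted = toBeConverted.replace("e", "")
--
--     while toBeConverted.find("o") >= 0:
--         toBeConverted = toBeConverted.replace("o", "")
--
--     letterCounter = 0
--     for i in range(0, len(toBeConverted)):
--         currentChar = toBeConverted[i]
--         if (currentChar != " "):
--             if (letterCounter % 5 == 0):
--                 converted += currentChar
--                 letterCounter += 1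
--             elif (letterCounter % 5 == 1):
--                 converted += currentChar.upper()
--                 letterCounter += 1
--             elif (letterCounter % 5 == 2 or letterCounter % 5 == 3):
--                 converted += currentChar
--                 letterCounter += 1
--             elif (letterCounter % 5 == 4):
--                 converted += currentChar.upper()
--                 letterCounter += 1
--         else:
--             converted += currentChar
--
--     return converted
-- ===== SOURCE B (Python) =====
-- def spongbobMockCovert(toBeConverted):
--     s = toBeConverted.replace('e', '').replace('o', '')
--     letters = [c for c in s if c != ' ']
--     mocked = [c.upper() if r % 5 in (1, 4) else c for r, c in enumerate(letters)]
--     it = iter(mocked)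
--     return ''.join(' ' if c == ' ' else next(it) for c in s)
-- ===== Notes on version B (the rewrite author's own statement) =====
-- stated objective: alternative
-- what changed: Replaces A's single counter-threaded forward loop (plus its while-find-replace loops and elif chain) with a three-pass decomposition: strip via chained str.replace, extract the non-space letters, uppercase them by rank in a comprehension, then re-interleave the mocked letters with the spaces of the string.
import Mathlib
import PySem

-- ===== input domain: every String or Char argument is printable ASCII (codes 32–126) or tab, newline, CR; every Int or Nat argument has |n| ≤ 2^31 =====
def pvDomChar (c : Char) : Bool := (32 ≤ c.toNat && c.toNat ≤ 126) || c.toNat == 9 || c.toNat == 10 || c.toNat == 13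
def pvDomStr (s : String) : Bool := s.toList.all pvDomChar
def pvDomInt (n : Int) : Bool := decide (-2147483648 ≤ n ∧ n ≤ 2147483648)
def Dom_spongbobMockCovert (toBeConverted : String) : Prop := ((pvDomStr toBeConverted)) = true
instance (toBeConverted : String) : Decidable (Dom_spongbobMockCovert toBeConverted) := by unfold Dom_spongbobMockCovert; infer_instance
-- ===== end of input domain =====

-- B replaces A's counter-threaded forward loop (with its while+replace loops and elif chain) by a
-- different decomposition: extract the non-space letters, uppercase them by rank, re-interleave with
-- the spaces; objective: alternative (same cost, different structure).

-- ===== PORT A =====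
-- A's 'while find("e") >= 0: replace' loop; the fuel argument only makes the recursion total,
-- the loop body is unchanged.
def pvStripLoop (pat : String) (s : String) (fuel : Nat) : String :=
  match fuel with
  | 0 => s
  | fuel + 1 =>
      if 0 ≤ PySem.Str.find s pat then pvStripLoop pat (PySem.Str.replace s pat "") fuel
      else s

-- the body of A's for loop, one step: branch order exactly as in the Python
def pvStepA (st : List Char × Int) (currentChar : Char) : List Char × Int :=
  let converted := st.1
  let letterCounter := st.2
  if currentChar ≠ ' ' then
    if PySem.Int.mod letterCounter 5 = 0 then (converted ++ [currentChar], letterCounter + 1)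
    else if PySem.Int.mod letterCounter 5 = 1 then (converted ++ [PySem.Chars.upperChar currentChar], letterCounter + 1)
    else if PySem.Int.mod letterCounter 5 = 2 ∨ PySem.Int.mod letterCounter 5 = 3 then (converted ++ [currentChar], letterCounter + 1)
    else if PySem.Int.mod letterCounter 5 = 4 then (converted ++ [PySem.Chars.upperChar currentChar], letterCounter + 1)
    else (converted, letterCounter)
  else (converted ++ [currentChar], letterCounter)

def spongbobMockCovert (toBeConverted : String) : String :=
  let t1 := pvStripLoop "e" toBeConverted (toBeConverted.toList.length + 1)
  let t2 := pvStripLoop "o" t1 (t1.toList.length + 1)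
  let s := t2.toList
  let res := (PySem.List.pyRange 0 (PySem.List.len s) 1).foldl
    (fun st i => pvStepA st (PySem.List.pyGetD s i ' ')) ([], 0)
  String.ofList res.1

-- ===== PORT B =====
-- ''.join(' ' if c == ' ' else next(it) for c in s): walk s, consuming the mocked letters in order.
def pvMerge : List Char → List Char → List Char
  | [], _ => []
  | c :: t, m =>
      if c = ' ' then ' ' :: pvMerge t m
      else
        match m with
        | [] => []          -- never reached: one mocked letter exists per non-space of s
        | h :: m' => h :: pvMerge t m'

def spongbobMockCovert_alt (toBeConverted : String) : String :=
  let s := (PySem.Str.replace (PySem.Str.replace toBeConverted "e" "") "o" "").toList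
  let letters := s.filter (fun c => c ≠ ' ')
  let mocked := (PySem.List.enumerate letters).map
    (fun p => if PySem.Int.mod p.1 5 = 1 ∨ PySem.Int.mod p.1 5 = 4 then PySem.Chars.upperChar p.2 else p.2)
  String.ofList (pvMerge s mocked)

-- ===== PRECONDITION & SPEC =====
def Spec_spongbobMockCovert (toBeConverted : String) (out : String) : Prop := out = spongbobMockCovert_alt toBeConverted
instance (toBeConverted : String) (out : String) : Decidable (Spec_spongbobMockCovert toBeConverted out) := by unfold Spec_spongbobMockCovert; infer_instance

-- ===== CLAIM (what is proved, stated in full; the proofs are below) =====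
def Claim_equal_spongbobMockCovert : Prop := ∀ (toBeConverted : String), Dom_spongbobMockCovert toBeConverted → Spec_spongbobMockCovert toBeConverted (spongbobMockCovert toBeConverted)

-- ===== LEMMAS AND PROOFS =====

-- common normal form: walk the string once, spaces kept, k-th non-space letter uppercased iff k % 5 ∈ {1,4}
def pvF (k : Nat) (c : Char) : Char :=
  if k % 5 = 1 ∨ k % 5 = 4 then PySem.Chars.upperChar c else c

def pvProcess : List Char → Nat → List Char
  | [], _ => []
  | c :: t, k => if c = ' ' then ' ' :: pvProcess t k else pvF k c :: pvProcess t (k + 1)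

-- replace s [c] [] is the filter removing c
lemma pvReplaceGo (c : Char) (l acc : List Char) (fuel : Nat) (h : l.length ≤ fuel) :
    PySem.Chars.replace.go [c] [] fuel l acc = acc.reverse ++ l.filter (fun x => x ≠ c) := by
  induction l generalizing fuel acc with
  | nil => cases fuel <;> simp [PySem.Chars.replace.go]
  | cons x t ih =>
      cases fuel with
      | zero => simp at h
      | succ fuel =>
          simp only [List.length_cons] at h
          rw [PySem.Chars.replace.go]
          by_cases hx : c = x
          · subst hx
            rw [if_pos (by simp [List.isPrefixOf])]
            simp only [List.length_cons, List.drop_succ_cons, List.length_nil, List.drop_zero,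
              List.reverse_nil, List.nil_append]
            rw [ih acc fuel (by omega)]
            simp
          · rw [if_neg (by simp [List.isPrefixOf, hx])]
            rw [ih (x :: acc) fuel (by omega)]
            simp [Ne.symm hx]

lemma pvReplaceFilter (s : List Char) (c : Char) :
    PySem.Chars.replace s [c] [] = s.filter (fun x => x ≠ c) := by
  rw [PySem.Chars.replace]
  simp only [List.isEmpty_cons]
  rw [if_neg (by simp)]
  exact pvReplaceGo c s [] s.length le_rfl

lemma pvSingletonInfix (c : Char) (l : List Char) : [c] <:+: l ↔ c ∈ l := by
  constructor
  · intro h; exact (List.singleton_sublist).1 h.sublist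
  · intro h
    obtain ⟨u, v, huv⟩ := List.append_of_mem h
    exact ⟨u, v, by simp [huv]⟩

-- the while loop runs at most once and equals one replace
lemma pvStripLoop_eq (pat : String) (c : Char) (hp : pat.toList = [c]) (s : String)
    (fuel : Nat) (hf : 1 ≤ fuel) :
    pvStripLoop pat s fuel = PySem.Str.replace s pat "" := by
  obtain ⟨fuel, rfl⟩ : ∃ k, fuel = k + 1 := ⟨fuel - 1, by omega⟩
  rw [pvStripLoop]
  by_cases h : 0 ≤ PySem.Str.find s pat
  · rw [if_pos h]
    have hmem : c ∉ (PySem.Str.replace s pat "").toList := by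
      rw [PySem.Str.toList_replace, hp, show ("" : String).toList = [] by simp,
        pvReplaceFilter]
      simp
    cases fuel with
    | zero => rfl
    | succ fuel' =>
        rw [pvStripLoop, if_neg ?_]
        intro hge
        have := (PySem.Str.find_nonneg_iff _ _).1 hge
        rw [hp] at this
        exact hmem ((pvSingletonInfix _ _).1 this)
  · rw [if_neg h]
    have hni : c ∉ s.toList := by
      intro hm
      exact h ((PySem.Str.find_nonneg_iff _ _).2 (by rw [hp]; exact (pvSingletonInfix _ _).2 hm))
    apply String.toList_inj.mp
    rw [PySem.Str.toList_replace, hp, show ("" : String).toList = [] by simp, pvReplaceFilter]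
    rw [List.filter_eq_self.2 (by intro x hx; simp; rintro rfl; exact hni hx)]

-- Int-mod of a Nat counter is its Nat mod
lemma pvModEq (n : Nat) : PySem.Int.mod (n : Int) 5 = ((n % 5 : Nat) : Int) := by
  unfold PySem.Int.mod
  rw [Int.fmod_eq_emod]
  norm_num

lemma pvStepA_space (st : List Char × Int) : pvStepA st ' ' = (st.1 ++ [' '], st.2) := by
  simp [pvStepA]

-- one step of A on a non-space char
lemma pvStepA_char (acc : List Char) (n : Nat) (c : Char) (hc : c ≠ ' ') :
    pvStepA (acc, (n : Int)) c = (acc ++ [pvF n c], ((n + 1 : Nat) : Int)) := by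
  unfold pvStepA pvF
  rw [if_pos hc, pvModEq n]
  have h5 : n % 5 = 0 ∨ n % 5 = 1 ∨ n % 5 = 2 ∨ n % 5 = 3 ∨ n % 5 = 4 := by omega
  rcases h5 with h | h | h | h | h <;> rw [h] <;> norm_num

-- A's fold computes pvProcess
lemma pvAFold (s acc : List Char) (n : Nat) :
    s.foldl pvStepA (acc, (n : Int)) =
      (acc ++ pvProcess s n, ((n + s.countP (fun c => c ≠ ' ') : Nat) : Int)) := by
  induction s generalizing acc n with
  | nil => simp [pvProcess]
  | cons c t ih =>
      by_cases hc : c = ' '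
      · subst hc
        simp only [List.foldl_cons, pvStepA_space]
        rw [ih]
        simp [pvProcess]
      · simp only [List.foldl_cons, pvStepA_char acc n c hc]
        rw [ih]
        simp only [pvProcess, if_neg hc, List.countP_cons, Prod.mk.injEq]
        refine ⟨by simp, congrArg (fun k : Nat => (k : Int)) (by simp [hc]; omega)⟩

-- B's enumerate-map is a rank map
def pvMapRank : List Char → Nat → List Char
  | [], _ => []
  | c :: t, n => pvF n c :: pvMapRank t (n + 1)

lemma pvEnumMap (l : List Char) (n : Nat) :
    (PySem.List.enumerate l (n : Int)).map
      (fun p => if PySem.Int.mod p.1 5 = 1 ∨ PySem.Int.mod p.1 5 = 4 then PySem.Chars.upperChar p.2 else p.2)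
      = pvMapRank l n := by
  induction l generalizing n with
  | nil => simp [PySem.List.enumerate_nil, pvMapRank]
  | cons c t ih =>
      rw [PySem.List.enumerate_cons]
      simp only [List.map_cons, pvMapRank, List.cons.injEq]
      constructor
      · rw [pvModEq n]
        simp only [pvF]
        have hnn : (((n % 5 : Nat) : Int) = 1 ∨ ((n % 5 : Nat) : Int) = 4) ↔
            (n % 5 = 1 ∨ n % 5 = 4) := by omega
        rw [if_congr hnn rfl rfl]
      · rw [show ((n : Int) + 1) = ((n + 1 : Nat) : Int) by push_cast; ring, ih]

lemma pvMergeProcess (s : List Char) (n : Nat) :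
    pvMerge s (pvMapRank (s.filter (fun c => c ≠ ' ')) n) = pvProcess s n := by
  induction s generalizing n with
  | nil => simp [pvMerge, pvProcess]
  | cons c t ih =>
      by_cases hc : c = ' '
      · subst hc
        have hf : List.filter (fun c => decide (c ≠ ' ')) (' ' :: t) =
            List.filter (fun c => decide (c ≠ ' ')) t := by simp
        rw [hf]
        simp only [pvMerge, pvProcess, if_true]
        exact congrArg _ (ih n)
      · have hf : List.filter (fun c => decide (c ≠ ' ')) (c :: t) =
            c :: List.filter (fun c => decide (c ≠ ' ')) t := by simp [hc]
        rw [hf]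
        simp only [pvMapRank, pvMerge, pvProcess, if_neg hc]
        exact congrArg _ (ih (n + 1))

-- ===== VERDICT (by name: the statement is the Claim_ definition above) =====
theorem spongbobMockCovert_spec : Claim_equal_spongbobMockCovert := by
  intro t _
  show spongbobMockCovert t = spongbobMockCovert_alt t
  simp only [spongbobMockCovert, spongbobMockCovert_alt]
  rw [pvStripLoop_eq "e" 'e' (by simp) t _ (by omega)]
  rw [pvStripLoop_eq "o" 'o' (by simp) _ _ (by omega)]
  rw [PySem.List.foldl_pyRange_zero_pyGetD _ ' ' pvStepA ([], 0)]
  rw [show ((0 : Int)) = ((0 : Nat) : Int) from rfl]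
  rw [pvAFold _ [] 0, pvEnumMap _ 0, pvMergeProcess _ 0]
  simp
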